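-- pv_equiv track=rewrite | github.com/DASDAE/dascore | dascore/utils/misc.py | _dict_list_diffs
-- ===== SOURCE A (Python) =====
-- def _dict_list_diffs(dict_list):
--     """Return the keys which are not equal dicts in a list."""
--     out = set()
--     first = dict_list[0]
--     first_keys = set(first)
--     for other in dict_list[1:]:
--         if other == first:
--             continue
--         other_keys = set(other)
--         out |= (other_keys - first_keys) | (first_keys - other_keys)
--         common_keys = other_keys & first_keys
--         for key in common_keys:
--             if first[key] != other[key]:
--                 out.add(key)
--     return sorted(out)
-- ===== SOURCE B (Python) =====
-- def _dict_list_diffs(dict_list):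
--     """Return the keys which are not equal dicts in a list."""
--     first = dict_list[0]
--     rest = dict_list[1:]
--     missing = object()
--     all_keys = set()
--     for d in dict_list:
--         all_keys.update(d)
--     out = []
--     for key in all_keys:
--         base = first.get(key, missing)
--         if any(d.get(key, missing) != base for d in rest):
--             out.append(key)
--     return sorted(out)
-- ===== Notes on version B (the rewrite author's own statement) =====
-- stated objective: simpler
-- what changed: Replaces A's dict-major pass (per-dict symmetric difference of key sets, intersection, and inner value scan) with a key-major scan: build the union of all keys once, then for each key compare first.get(key, sentinel) against every other dict and collect the keys where any lookup differs.
import Mathlib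
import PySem

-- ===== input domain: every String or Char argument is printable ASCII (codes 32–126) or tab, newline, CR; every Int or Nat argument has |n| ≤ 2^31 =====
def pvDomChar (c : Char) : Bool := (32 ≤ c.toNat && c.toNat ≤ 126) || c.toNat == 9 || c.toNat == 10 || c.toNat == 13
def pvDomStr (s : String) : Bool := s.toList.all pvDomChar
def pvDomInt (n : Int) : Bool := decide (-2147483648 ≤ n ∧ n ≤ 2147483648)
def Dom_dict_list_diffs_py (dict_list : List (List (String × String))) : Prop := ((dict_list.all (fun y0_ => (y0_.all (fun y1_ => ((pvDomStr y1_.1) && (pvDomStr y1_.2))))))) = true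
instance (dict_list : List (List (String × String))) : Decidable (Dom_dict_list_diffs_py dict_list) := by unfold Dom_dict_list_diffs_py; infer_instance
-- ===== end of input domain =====

-- B transposes A's dict-major symmetric-difference loops into a single key-major scan (union of keys,
-- then one pass over the other dicts per key); objective: simpler. Equivalence is about the return value.

-- ===== PORT A =====
-- Python's order-insensitive dict equality `other == first`: same key set, equal values at every key.
def pyDictEq (a b : List (String × String)) : Bool :=
  PySem.Set.equal (PySem.Set.ofList (a.map Prod.fst)) (PySem.Set.ofList (b.map Prod.fst)) &&
  (a.map Prod.fst).all (fun k => (PySem.Dict.mk a).get? k == (PySem.Dict.mk b).get? k)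

def dict_list_diffs_py (dict_list : List (List (String × String))) : List String :=
  let first := (PySem.List.pyGet? dict_list 0).getD []   -- dict_list[0]; IndexError on [] is excluded by Pre_
  let firstKeys : PySem.Set String := PySem.Set.ofList (first.map Prod.fst)
  let out : PySem.Set String :=
    (PySem.List.slice dict_list (some 1) none).foldl
      (fun out other =>
        if pyDictEq other first then out
        else
          let otherKeys : PySem.Set String := PySem.Set.ofList (other.map Prod.fst)
          let out := PySem.Set.union out
            (PySem.Set.union (PySem.Set.diff otherKeys firstKeys) (PySem.Set.diff firstKeys otherKeys))
          (PySem.Set.inter otherKeys firstKeys).foldl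
            (fun out key =>
              if (PySem.Dict.mk first).getD key "" ≠ (PySem.Dict.mk other).getD key "" then
                PySem.Set.add out key
              else out)
            out)
      PySem.Set.empty
  PySem.List.sorted out (fun x => x)

-- ===== PORT B =====
def dict_list_diffs_py_alt (dict_list : List (List (String × String))) : List String :=
  let first := (PySem.List.pyGet? dict_list 0).getD []   -- dict_list[0]; IndexError on [] is excluded by Pre_
  let rest := PySem.List.slice dict_list (some 1) none
  -- all_keys = union of the key sets of every dict; the `missing` sentinel is Option's none
  let allKeys : PySem.Set String :=
    dict_list.foldl (fun s d => PySem.Set.update s (d.map Prod.fst)) PySem.Set.empty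
  let out := allKeys.filter (fun key =>
    rest.any (fun d => (PySem.Dict.mk d).get? key != (PySem.Dict.mk first).get? key))
  PySem.List.sorted out (fun x => x)

-- ===== PRECONDITION & SPEC =====
-- A evaluates dict_list[0]: on the empty list it raises IndexError, so Pre_ excludes exactly [].
def Pre_dict_list_diffs_py (dict_list : List (List (String × String))) : Prop := dict_list ≠ []
instance (dict_list : List (List (String × String))) : Decidable (Pre_dict_list_diffs_py dict_list) := by unfold Pre_dict_list_diffs_py; infer_instance
def pvWitness_dict_list_diffs_py : (List (List (String × String))) := ([[("a", "1")], [("a", "2"), ("b", "1")]])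
def Spec_dict_list_diffs_py (dict_list : List (List (String × String))) (out : List String) : Prop := out = dict_list_diffs_py_alt dict_list
instance (dict_list : List (List (String × String))) (out : List String) : Decidable (Spec_dict_list_diffs_py dict_list out) := by unfold Spec_dict_list_diffs_py; infer_instance

-- ===== CLAIM (what is proved, stated in full; the proofs are below) =====
def Claim_equal_dict_list_diffs_py : Prop := ∀ (dict_list : List (List (String × String))), Dom_dict_list_diffs_py dict_list → Pre_dict_list_diffs_py dict_list → Spec_dict_list_diffs_py dict_list (dict_list_diffs_py dict_list)

-- ===== LEMMAS AND PROOFS =====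

-- `x differs between f and o` — the one predicate both algorithms decide per (other, key)
def pvDiffAt (f o : List (String × String)) (x : String) : Prop :=
  (PySem.Dict.mk f).get? x ≠ (PySem.Dict.mk o).get? x

lemma pv_get?_none_iff (d : List (String × String)) (x : String) :
    (PySem.Dict.mk d).get? x = none ↔ x ∉ d.map Prod.fst := by
  have h := PySem.Dict.get?_eq_none_iff_not_mem_keys (PySem.Dict.mk d) x
  simpa [PySem.Dict.keys, PySem.Dict.items] using h

lemma pvDictEq_get? (o f : List (String × String)) (h : pyDictEq o f = true) (x : String) :
    (PySem.Dict.mk f).get? x = (PySem.Dict.mk o).get? x := by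
  unfold pyDictEq at h
  rw [Bool.and_eq_true] at h
  obtain ⟨hk, hv⟩ := h
  rw [PySem.Set.equal_iff] at hk
  simp only [List.all_eq_true, beq_iff_eq] at hv
  by_cases hm : x ∈ o.map Prod.fst
  · exact (hv x hm).symm
  · have hmf : x ∉ f.map Prod.fst := fun hfm =>
      hm (by simpa [PySem.Set.mem_ofList] using
        (hk x).mpr (by simpa [PySem.Set.mem_ofList] using hfm))
    rw [(pv_get?_none_iff f x).mpr hmf, (pv_get?_none_iff o x).mpr hm]

-- membership through the inner 'for key in common_keys' loop
lemma pv_mem_foldl_add_if (l : List String) (p : String → Prop) [DecidablePred p]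
    (s : PySem.Set String) (x : String) :
    x ∈ l.foldl (fun s k => if p k then PySem.Set.add s k else s) s ↔
      x ∈ s ∨ (x ∈ l ∧ p x) := by
  induction l generalizing s with
  | nil => simp
  | cons a l ih =>
    simp only [List.foldl_cons, ih, List.mem_cons]
    by_cases hp : p a
    · rw [if_pos hp]
      simp only [PySem.Set.mem_add]
      constructor
      · rintro ((h | rfl) | ⟨h, hx⟩)
        · exact Or.inl h
        · exact Or.inr ⟨Or.inl rfl, hp⟩
        · exact Or.inr ⟨Or.inr h, hx⟩
      · rintro (h | ⟨(rfl | h), hx⟩)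
        · exact Or.inl (Or.inl h)
        · exact Or.inl (Or.inr rfl)
        · exact Or.inr ⟨h, hx⟩
    · rw [if_neg hp]
      constructor
      · rintro (h | ⟨h, hx⟩)
        · exact Or.inl h
        · exact Or.inr ⟨Or.inr h, hx⟩
      · rintro (h | ⟨(rfl | h), hx⟩)
        · exact Or.inl h
        · exact absurd hx hp
        · exact Or.inr ⟨h, hx⟩

lemma pv_nodup_foldl_add_if (l : List String) (p : String → Prop) [DecidablePred p]
    (s : PySem.Set String) (h : s.Nodup) :
    (l.foldl (fun s k => if p k then PySem.Set.add s k else s) s).Nodup := by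
  induction l generalizing s with
  | nil => exact h
  | cons a l ih =>
    simp only [List.foldl_cons]
    by_cases hp : p a
    · rw [if_pos hp]
      exact ih _ (PySem.Set.nodup_add s a h)
    · rw [if_neg hp]
      exact ih _ h

-- the per-`other` body of A adds exactly the keys where the two lookups differ
lemma pv_charac (f o : List (String × String)) (x : String) :
    ((x ∈ o.map Prod.fst ∧ x ∉ f.map Prod.fst) ∨ (x ∈ f.map Prod.fst ∧ x ∉ o.map Prod.fst) ∨
      (x ∈ o.map Prod.fst ∧ x ∈ f.map Prod.fst ∧
        (PySem.Dict.mk f).getD x "" ≠ (PySem.Dict.mk o).getD x "")) ↔ pvDiffAt f o x := by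
  unfold pvDiffAt
  by_cases hf : x ∈ f.map Prod.fst <;> by_cases ho : x ∈ o.map Prod.fst
  · -- both present: get? are both some, compare the values via getD
    have hfs : (PySem.Dict.mk f).get? x ≠ none := by rw [Ne, pv_get?_none_iff]; exact fun h => h hf
    have hos : (PySem.Dict.mk o).get? x ≠ none := by rw [Ne, pv_get?_none_iff]; exact fun h => h ho
    obtain ⟨vf, hvf⟩ := Option.ne_none_iff_exists'.mp hfs
    obtain ⟨vo, hvo⟩ := Option.ne_none_iff_exists'.mp hos
    simp [hf, ho, PySem.Dict.getD_eq_get?_getD, hvf, hvo]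
  · have hno := (pv_get?_none_iff o x).mpr ho
    have hfs : (PySem.Dict.mk f).get? x ≠ none := fun h => ((pv_get?_none_iff f x).mp h) hf
    constructor
    · intro _; rw [hno]; exact hfs
    · intro _; exact Or.inr (Or.inl ⟨hf, ho⟩)
  · have hno := (pv_get?_none_iff f x).mpr hf
    have hos : (PySem.Dict.mk o).get? x ≠ none := fun h => ((pv_get?_none_iff o x).mp h) ho
    constructor
    · intro _; rw [hno]; exact fun h => hos h.symm
    · intro _; exact Or.inl ⟨ho, hf⟩
  · have h1 := (pv_get?_none_iff f x).mpr hf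
    have h2 := (pv_get?_none_iff o x).mpr ho
    simp [hf, ho, h1, h2]

-- membership through A's outer loop over dict_list[1:]
lemma pv_mem_outer (others : List (List (String × String))) (first : List (String × String))
    (s : PySem.Set String) (x : String) :
    x ∈ others.foldl
      (fun out other =>
        if pyDictEq other first then out
        else
          (PySem.Set.inter (PySem.Set.ofList (other.map Prod.fst))
              (PySem.Set.ofList (first.map Prod.fst))).foldl
            (fun out key =>
              if (PySem.Dict.mk first).getD key "" ≠ (PySem.Dict.mk other).getD key "" then
                PySem.Set.add out key
              else out)
            (PySem.Set.union out
              (PySem.Set.union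
                (PySem.Set.diff (PySem.Set.ofList (other.map Prod.fst)) (PySem.Set.ofList (first.map Prod.fst)))
                (PySem.Set.diff (PySem.Set.ofList (first.map Prod.fst)) (PySem.Set.ofList (other.map Prod.fst)))))) s
      ↔ x ∈ s ∨ ∃ o ∈ others, pvDiffAt first o x := by
  induction others generalizing s with
  | nil => simp
  | cons o others ih =>
    simp only [List.foldl_cons, ih]
    by_cases he : pyDictEq o first
    · have hno : ¬ pvDiffAt first o x := by
        unfold pvDiffAt; rw [pvDictEq_get? o first he x]; simp
      rw [if_pos he]
      constructor
      · rintro (h | ⟨oo, hoo, hd⟩)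
        · exact Or.inl h
        · exact Or.inr ⟨oo, List.mem_cons_of_mem _ hoo, hd⟩
      · rintro (h | ⟨oo, hoo, hd⟩)
        · exact Or.inl h
        · rcases List.mem_cons.mp hoo with rfl | hoo
          · exact absurd hd hno
          · exact Or.inr ⟨oo, hoo, hd⟩
    · rw [if_neg he, pv_mem_foldl_add_if]
      simp only [PySem.Set.mem_union, PySem.Set.mem_diff, PySem.Set.mem_inter, PySem.Set.mem_ofList]
      constructor
      · rintro (((h | (h | h)) | ⟨⟨h1, h2⟩, hp⟩) | ⟨oo, hoo, hd⟩)
        · exact Or.inl h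
        · exact Or.inr ⟨o, List.mem_cons_self, (pv_charac first o x).mp (Or.inl h)⟩
        · exact Or.inr ⟨o, List.mem_cons_self, (pv_charac first o x).mp (Or.inr (Or.inl h))⟩
        · exact Or.inr ⟨o, List.mem_cons_self,
            (pv_charac first o x).mp (Or.inr (Or.inr ⟨h1, h2, hp⟩))⟩
        · exact Or.inr ⟨oo, List.mem_cons_of_mem _ hoo, hd⟩
      · rintro (h | ⟨oo, hoo, hd⟩)
        · exact Or.inl (Or.inl (Or.inl h))
        · rcases List.mem_cons.mp hoo with rfl | hoo
          · rcases (pv_charac first oo x).mpr hd with h | h | h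
            · exact Or.inl (Or.inl (Or.inr (Or.inl h)))
            · exact Or.inl (Or.inl (Or.inr (Or.inr h)))
            · exact Or.inl (Or.inr ⟨⟨h.1, h.2.1⟩, h.2.2⟩)
          · exact Or.inr ⟨oo, hoo, hd⟩

lemma pv_nodup_outer (others : List (List (String × String))) (first : List (String × String))
    (s : PySem.Set String) (h : s.Nodup) :
    (others.foldl
      (fun out other =>
        if pyDictEq other first then out
        else
          (PySem.Set.inter (PySem.Set.ofList (other.map Prod.fst))
              (PySem.Set.ofList (first.map Prod.fst))).foldl
            (fun out key =>
              if (PySem.Dict.mk first).getD key "" ≠ (PySem.Dict.mk other).getD key "" then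
                PySem.Set.add out key
              else out)
            (PySem.Set.union out
              (PySem.Set.union
                (PySem.Set.diff (PySem.Set.ofList (other.map Prod.fst)) (PySem.Set.ofList (first.map Prod.fst)))
                (PySem.Set.diff (PySem.Set.ofList (first.map Prod.fst)) (PySem.Set.ofList (other.map Prod.fst)))))) s).Nodup := by
  induction others generalizing s with
  | nil => exact h
  | cons o others ih =>
    simp only [List.foldl_cons]
    by_cases he : pyDictEq o first
    · rw [if_pos he]; exact ih _ h
    · rw [if_neg he]
      exact ih _ (pv_nodup_foldl_add_if _ _ _ (PySem.Set.nodup_union _ _ h))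

-- membership and nodup of B's key union
lemma pv_mem_allKeys (l : List (List (String × String))) (s : PySem.Set String) (x : String) :
    x ∈ l.foldl (fun s d => PySem.Set.update s (d.map Prod.fst)) s ↔
      x ∈ s ∨ ∃ d ∈ l, x ∈ d.map Prod.fst := by
  induction l generalizing s with
  | nil => simp
  | cons d l ih =>
    simp only [List.foldl_cons, ih, PySem.Set.mem_update]
    constructor
    · rintro ((h | h) | ⟨dd, hdd, hx⟩)
      · exact Or.inl h
      · exact Or.inr ⟨d, List.mem_cons_self, h⟩
      · exact Or.inr ⟨dd, List.mem_cons_of_mem _ hdd, hx⟩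
    · rintro (h | ⟨dd, hdd, hx⟩)
      · exact Or.inl (Or.inl h)
      · rcases List.mem_cons.mp hdd with rfl | hdd
        · exact Or.inl (Or.inr hx)
        · exact Or.inr ⟨dd, hdd, hx⟩

lemma pv_nodup_allKeys (l : List (List (String × String))) (s : PySem.Set String) (h : s.Nodup) :
    (l.foldl (fun s d => PySem.Set.update s (d.map Prod.fst)) s).Nodup := by
  induction l generalizing s with
  | nil => exact h
  | cons d l ih => exact ih _ (PySem.Set.nodup_update _ _ h)

-- ===== VERDICT (by name: the statement is the Claim_ definition above) =====
theorem dict_list_diffs_py_spec : Claim_equal_dict_list_diffs_py := by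
  intro dict_list _ hpre
  unfold Spec_dict_list_diffs_py dict_list_diffs_py dict_list_diffs_py_alt
  cases dict_list with
  | nil => exact absurd rfl hpre
  | cons first rest0 =>
    simp only [PySem.List.pyGet?_zero_cons, Option.getD_some, PySem.List.slice_from_one, List.tail_cons]
    apply PySem.List.sorted_eq_sorted_of_perm _ _ _ Function.injective_id
    refine (List.perm_ext_iff_of_nodup
      (pv_nodup_outer rest0 first _ List.nodup_nil)
      (List.Nodup.filter _ (pv_nodup_allKeys (first :: rest0) _ List.nodup_nil))).mpr ?_
    intro x
    rw [pv_mem_outer]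
    simp only [List.mem_filter, pv_mem_allKeys, List.mem_nil_iff, false_or, List.any_eq_true,
      bne_iff_ne]
    constructor
    · rintro ⟨o, ho, hd⟩
      unfold pvDiffAt at hd
      refine ⟨?_, o, ho, Ne.symm hd⟩
      by_cases hm : x ∈ o.map Prod.fst
      · exact ⟨o, List.mem_cons_of_mem _ ho, hm⟩
      · have hf : x ∈ first.map Prod.fst := by
          by_contra hmf
          exact hd (by rw [(pv_get?_none_iff first x).mpr hmf, (pv_get?_none_iff o x).mpr hm])
        exact ⟨first, List.mem_cons_self, hf⟩
    · rintro ⟨-, o, ho, hd⟩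
      exact ⟨o, ho, by unfold pvDiffAt; exact Ne.symm hd⟩
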